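-- pv_equiv track=rewrite | github.com/patrikLM10/timetable-generator-hackHeritage | app2.py | get_time_slots
-- ===== SOURCE A (Python) =====
-- from typing import Dict, List, Tuple, Any
--
-- def get_time_slots(slot_dict: Dict[str, int], start_times: Dict[str, int]) -> Tuple[List[str], Dict[str,int], Dict[str,str], Dict[str,int]]:
--     """
--     Generate time slots based on working days and hours.
--     Returns:
--       - slot_names: ordered list of slot ids (variable order used by CSP)
--       - slot_time: mapping slot_id -> start hour (int)
--       - slot_to_day: mapping slot_id -> day in lowercase (e.g., 'monday')
--       - day_slot_counts: mapping day.lower() -> number of slots for that day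
--     Notes:
--       - Creates exactly `total_hours` slots per day.
--       - Skips the lunch hour by adding 2 when current hour == 12 (consistent with your original logic).
--     """
--     slot_names: List[str] = []
--     slot_time: Dict[str, int] = {}
--     slot_to_day: Dict[str, str] = {}
--     day_slot_counts: Dict[str, int] = {}
--
--     day_abbreviations = {
--         'Monday': 'M', 'Tuesday': 'T', 'Wednesday': 'W',
--         'Thursday': 'Th', 'Friday': 'F', 'Saturday': 'Sa', 'Sunday': 'Su'
--     }
--
--     for day, hours in slot_dict.items():
--         hours = int(hours)
--         start = int(start_times[day])
--         abbrev = day_abbreviations.get(day, day[:2])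
--         day_count = 0
--
--         for j in range(hours):  # create exactly `hours` slots
--             slot_name = f"{abbrev}{j + 1}"
--             slot_names.append(slot_name)
--             slot_time[slot_name] = start
--             slot_to_day[slot_name] = day.lower()
--             day_count += 1
--
--             # increment hour; if we hit lunch (12), skip next hour (increase by 2)
--             if start == 12:
--                 start += 2
--             else:
--                 start += 1
--
--         day_slot_counts[day.lower()] = day_count
--
--     return slot_names, slot_time, slot_to_day, day_slot_counts
-- ===== SOURCE B (Python) =====
-- from typing import Dict, List, Tuple
--
-- def get_time_slots(slot_dict: Dict[str, int], start_times: Dict[str, int]) -> Tuple[List[str], Dict[str,int], Dict[str,str], Dict[str,int]]: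
--     """Staged pipeline: per-day info tuples, then one flat record list
--     (name, hour, day-lowercase) with the hour given in closed form
--     (start0 + j, +1 once past the 12 o'clock lunch hour), then each of
--     the four outputs is built by its own independent pass."""
--     day_abbreviations = {
--         'Monday': 'M', 'Tuesday': 'T', 'Wednesday': 'W',
--         'Thursday': 'Th', 'Friday': 'F', 'Saturday': 'Sa', 'Sunday': 'Su'
--     }
--     infos = [(day, int(hours), int(start_times[day]),
--               day_abbreviations.get(day, day[:2]), day.lower())
--              for day, hours in slot_dict.items()]
--     records = [(f"{ab}{j + 1}",
--                 s0 + j + (1 if s0 <= 12 and s0 + j > 12 else 0),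
--                 low)
--                for _, h, s0, ab, low in infos for j in range(h)]
--     slot_names = [name for name, _, _ in records]
--     slot_time = {name: hour for name, hour, _ in records}
--     slot_to_day = {name: low for name, _, low in records}
--     day_slot_counts = {low: max(h, 0) for _, h, _, _, low in infos}
--     return slot_names, slot_time, slot_to_day, day_slot_counts
-- ===== Notes on version B (the rewrite author's own statement) =====
-- stated objective: alternative
-- what changed: B replaces A's single stateful loop nest (running start hour, per-day counter, four structures mutated in one interleaved pass) by a staged pipeline: a per-day info list, then one flat (name, hour, day) record list whose hour is the closed form start0 + j (+1 once past noon), and each of the four outputs built by its own independent comprehension over those lists.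
import Mathlib
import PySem

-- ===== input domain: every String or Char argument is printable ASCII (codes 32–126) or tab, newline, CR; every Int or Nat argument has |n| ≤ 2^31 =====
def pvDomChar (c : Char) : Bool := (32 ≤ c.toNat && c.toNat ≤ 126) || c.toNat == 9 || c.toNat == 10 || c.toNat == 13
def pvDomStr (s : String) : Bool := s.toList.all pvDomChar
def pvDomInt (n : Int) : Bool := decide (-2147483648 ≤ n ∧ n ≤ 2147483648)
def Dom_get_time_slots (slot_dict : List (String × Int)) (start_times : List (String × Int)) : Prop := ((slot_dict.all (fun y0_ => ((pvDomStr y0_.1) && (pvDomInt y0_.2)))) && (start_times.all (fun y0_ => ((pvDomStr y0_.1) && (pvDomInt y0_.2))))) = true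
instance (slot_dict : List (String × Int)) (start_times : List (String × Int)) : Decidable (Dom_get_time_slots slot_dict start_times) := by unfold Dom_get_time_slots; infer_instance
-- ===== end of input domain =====

-- B replaces A's single stateful loop nest by a staged pipeline (info list, flat record
-- list with a closed-form hour, independent output passes); return-value equivalence only.

-- ===== PORT A =====
-- shared literal table day_abbreviations
def pvAbbrevs : PySem.Dict String String := PySem.Dict.ofList
  [("Monday","M"),("Tuesday","T"),("Wednesday","W"),("Thursday","Th"),
   ("Friday","F"),("Saturday","Sa"),("Sunday","Su")]

-- f"{abbrev}{j+1}" : exact (decimal string of the int appended to abbrev)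
def pvSlotName (ab : String) (j : Int) : String :=
  String.ofList (ab.toList ++ PySem.Int.toChars (j + 1))

-- body of A's inner `for j in range(hours)` loop; state = (slot_names, slot_time, slot_to_day, start, day_count)
def pvInnerA (ab day : String)
    (s : List String × PySem.Dict String Int × PySem.Dict String String × Int × Int) (j : Int) :
    List String × PySem.Dict String Int × PySem.Dict String String × Int × Int :=
  match s with
  | (ns, t, td, start, c) =>
    let name := pvSlotName ab j
    (ns ++ [name], t.insert name start, td.insert name (PySem.Str.lower day),
     (if start == 12 then start + 2 else start + 1), c + 1)

-- body of A's outer `for day, hours in slot_dict.items()` loop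
def pvDayA (stD : PySem.Dict String Int)
    (acc : List String × PySem.Dict String Int × PySem.Dict String String × PySem.Dict String Int)
    (p : String × Int) :
    List String × PySem.Dict String Int × PySem.Dict String String × PySem.Dict String Int :=
  let day := p.1
  let hours := p.2
  let start := stD.getD day 0   -- Python raises KeyError when `day` is missing; Pre_ excludes that, so the default is never used
  let ab := pvAbbrevs.getD day (PySem.Str.slice day none (some 2))
  let inner := (PySem.List.pyRange 0 hours 1).foldl (pvInnerA ab day)
    (acc.1, acc.2.1, acc.2.2.1, start, 0)
  (inner.1, inner.2.1, inner.2.2.1, acc.2.2.2.insert (PySem.Str.lower day) inner.2.2.2.2)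

def get_time_slots (slot_dict : List (String × Int)) (start_times : List (String × Int)) : List String × (List (String × Int)) × (List (String × String)) × (List (String × Int)) :=
  let out := ((PySem.Dict.ofList slot_dict).items).foldl
    (pvDayA (PySem.Dict.ofList start_times))
    ([], PySem.Dict.empty, PySem.Dict.empty, PySem.Dict.empty)
  (out.1, out.2.1.items, out.2.2.1.items, out.2.2.2.items)

-- ===== PORT B =====
-- closed-form hour of slot index j when the day starts at s0 (the single lunch-hour skip)
def pvHour (s0 j : Int) : Int := s0 + j + (if s0 ≤ 12 ∧ s0 + j > 12 then 1 else 0)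

-- stage 1: per-day info tuples (day, hours, start0, abbrev, lowercase)
def pvInfos (stD : PySem.Dict String Int) (items : List (String × Int)) :
    List (String × Int × Int × String × String) :=
  items.map (fun p =>
    (p.1, p.2, stD.getD p.1 0,  -- same KeyError remark as in port A
     pvAbbrevs.getD p.1 (PySem.Str.slice p.1 none (some 2)), PySem.Str.lower p.1))

-- stage 2: one flat (name, hour, day-lowercase) record list
def pvRecords (infos : List (String × Int × Int × String × String)) :
    List (String × Int × String) :=
  infos.flatMap (fun i =>
    (PySem.List.pyRange 0 i.2.1 1).map (fun j => (pvSlotName i.2.2.2.1 j, pvHour i.2.2.1 j, i.2.2.2.2)))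

-- stage 3: each output is its own pass over the record / info list
def get_time_slots_alt (slot_dict : List (String × Int)) (start_times : List (String × Int)) : List String × (List (String × Int)) × (List (String × String)) × (List (String × Int)) :=
  let infos := pvInfos (PySem.Dict.ofList start_times) ((PySem.Dict.ofList slot_dict).items)
  let records := pvRecords infos
  (records.map (fun r => r.1),
   (PySem.Dict.ofList (records.map (fun r => (r.1, r.2.1)))).items,
   (PySem.Dict.ofList (records.map (fun r => (r.1, r.2.2)))).items,
   (PySem.Dict.ofList (infos.map (fun i => (i.2.2.2.2, max i.2.1 0)))).items)

-- ===== PRECONDITION & SPEC =====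
-- Pre_ excludes exactly the inputs on which Python A raises KeyError: a day of slot_dict absent from start_times
def Pre_get_time_slots (slot_dict : List (String × Int)) (start_times : List (String × Int)) : Prop :=
  ∀ p ∈ slot_dict, p.1 ∈ start_times.map Prod.fst
instance (slot_dict : List (String × Int)) (start_times : List (String × Int)) : Decidable (Pre_get_time_slots slot_dict start_times) := by unfold Pre_get_time_slots; infer_instance

def pvWitness_get_time_slots : (List (String × Int)) × (List (String × Int)) :=
  ([("Monday", 3), ("Friday", 2)], [("Monday", 11), ("Friday", 12)])

def Spec_get_time_slots (slot_dict : List (String × Int)) (start_times : List (String × Int)) (out : List String × (List (String × Int)) × (List (String × String)) × (List (String × Int))) : Prop := out = get_time_slots_alt slot_dict start_times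
instance (slot_dict : List (String × Int)) (start_times : List (String × Int)) (out : List String × (List (String × Int)) × (List (String × String)) × (List (String × Int))) : Decidable (Spec_get_time_slots slot_dict start_times out) := by unfold Spec_get_time_slots; infer_instance

-- ===== CLAIM (what is proved, stated in full; the proofs are below) =====
def Claim_equal_get_time_slots : Prop := ∀ (slot_dict : List (String × Int)) (start_times : List (String × Int)), Dom_get_time_slots slot_dict start_times → Pre_get_time_slots slot_dict start_times → Spec_get_time_slots slot_dict start_times (get_time_slots slot_dict start_times)

-- ===== LEMMAS AND PROOFS =====

-- A's running `start` after k steps is pvHour s0 k; its branch advances it to pvHour s0 (k+1)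
lemma pvHour_step (s0 : Int) (k : Nat) :
    (if pvHour s0 k == 12 then pvHour s0 k + 2 else pvHour s0 k + 1) = pvHour s0 (k + 1) := by
  simp only [pvHour]
  split_ifs with h1 h2 h3 <;> simp_all <;> omega

-- A's inner loop over range(hours) rewritten to the per-slot (name, hour) pairs
lemma innerA_eq (ab day : String) (s0 : Int) (h : Nat)
    (ns : List String) (t : PySem.Dict String Int) (td : PySem.Dict String String) :
    (PySem.List.pyRange 0 (h : Int) 1).foldl (pvInnerA ab day) (ns, t, td, s0, 0) =
      (ns ++ ((PySem.List.pyRange 0 (h : Int) 1).map (fun j => (pvSlotName ab j, pvHour s0 j))).map Prod.fst,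
       ((PySem.List.pyRange 0 (h : Int) 1).map (fun j => (pvSlotName ab j, pvHour s0 j))).foldl
         (fun d q => d.insert q.1 q.2) t,
       ((PySem.List.pyRange 0 (h : Int) 1).map (fun j => (pvSlotName ab j, pvHour s0 j))).foldl
         (fun d q => d.insert q.1 (PySem.Str.lower day)) td,
       pvHour s0 h, (h : Int)) := by
  induction h with
  | zero => simp [PySem.List.pyRange, pvHour]
  | succ n ih =>
    have hsplit : PySem.List.pyRange 0 ((n : Int) + 1) 1 =
        PySem.List.pyRange 0 (n : Int) 1 ++ [(n : Int)] :=
      PySem.List.pyRange_one_succ_right (by positivity)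
    push_cast
    rw [hsplit, List.foldl_append, ih, List.map_append, List.map_append, List.foldl_append,
        List.foldl_append]
    simp only [List.foldl_cons, List.foldl_nil, List.map_cons, List.map_nil, pvInnerA]
    rw [pvHour_step]
    simp [List.append_assoc]

-- the per-day record chunk of B, as the (name, hour) pairs tagged with the day's lowercase
lemma records_day (stD : PySem.Dict String Int) (p : String × Int) (L : List (String × Int)) :
    pvRecords (pvInfos stD (p :: L)) =
      ((PySem.List.pyRange 0 p.2 1).map
          (fun j => (pvSlotName (pvAbbrevs.getD p.1 (PySem.Str.slice p.1 none (some 2))) j,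
                     pvHour (stD.getD p.1 0) j))).map
        (fun q => (q.1, q.2, PySem.Str.lower p.1)) ++ pvRecords (pvInfos stD L) := by
  simp [pvInfos, pvRecords, List.map_map, Function.comp]

-- A's outer fold equals B's staged computation, for every accumulator
lemma outer_eq (stD : PySem.Dict String Int) (L : List (String × Int))
    (ns : List String) (t : PySem.Dict String Int) (td : PySem.Dict String String)
    (c : PySem.Dict String Int) :
    L.foldl (pvDayA stD) (ns, t, td, c) =
      (ns ++ (pvRecords (pvInfos stD L)).map (fun r => r.1),
       (pvRecords (pvInfos stD L)).foldl (fun d r => d.insert r.1 r.2.1) t,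
       (pvRecords (pvInfos stD L)).foldl (fun d r => d.insert r.1 r.2.2) td,
       (pvInfos stD L).foldl (fun d i => d.insert i.2.2.2.2 (max i.2.1 0)) c) := by
  induction L generalizing ns t td c with
  | nil => simp [pvInfos, pvRecords]
  | cons p L ih =>
    rw [List.foldl_cons, records_day]
    have hday : pvDayA stD (ns, t, td, c) p =
        (ns ++ (((PySem.List.pyRange 0 p.2 1).map
            (fun j => (pvSlotName (pvAbbrevs.getD p.1 (PySem.Str.slice p.1 none (some 2))) j,
                       pvHour (stD.getD p.1 0) j))).map
          (fun q => (q.1, q.2, PySem.Str.lower p.1))).map (fun r => r.1),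
         (((PySem.List.pyRange 0 p.2 1).map
            (fun j => (pvSlotName (pvAbbrevs.getD p.1 (PySem.Str.slice p.1 none (some 2))) j,
                       pvHour (stD.getD p.1 0) j))).map
          (fun q => (q.1, q.2, PySem.Str.lower p.1))).foldl (fun d r => d.insert r.1 r.2.1) t,
         (((PySem.List.pyRange 0 p.2 1).map
            (fun j => (pvSlotName (pvAbbrevs.getD p.1 (PySem.Str.slice p.1 none (some 2))) j,
                       pvHour (stD.getD p.1 0) j))).map
          (fun q => (q.1, q.2, PySem.Str.lower p.1))).foldl (fun d r => d.insert r.1 r.2.2) td,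
         c.insert (PySem.Str.lower p.1) (max p.2 0)) := by
      simp only [pvDayA, List.map_map, List.foldl_map]
      rcases le_or_gt p.2 0 with hle | hpos
      · have hnil : PySem.List.pyRange 0 p.2 1 = [] := by
          simp [PySem.List.pyRange]; omega
        simp [hnil, max_eq_right hle]
      · have hcast : ((p.2.toNat : Int)) = p.2 := Int.toNat_of_nonneg (le_of_lt hpos)
        rw [← hcast, innerA_eq]
        simp [max_eq_left (le_of_lt hpos), hcast, List.foldl_map]
    rw [hday, ih]
    simp [pvInfos, List.map_append, List.foldl_append, List.append_assoc]

-- Dict.ofList over a mapped list is the corresponding insert-fold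
lemma pvOfList_map {α ν : Type} [BEq ν] (l : List α) (f : α → String × ν) :
    PySem.Dict.ofList (l.map f) =
      l.foldl (fun d x => d.insert (f x).1 (f x).2) PySem.Dict.empty := by
  have h : PySem.Dict.ofList (l.map f) =
      (l.map f).foldl (fun d p => d.insert p.1 p.2) PySem.Dict.empty := rfl
  rw [h, List.foldl_map]

theorem pv_main (slot_dict start_times : List (String × Int)) :
    get_time_slots slot_dict start_times = get_time_slots_alt slot_dict start_times := by
  simp only [get_time_slots, get_time_slots_alt]
  rw [outer_eq, pvOfList_map, pvOfList_map, pvOfList_map]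
  simp

-- ===== VERDICT (by name: the statement is the Claim_ definition above) =====
theorem get_time_slots_spec : Claim_equal_get_time_slots := by
  intro sd st _ _
  exact pv_main sd st
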